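-- pv_equiv track=rewrite | github.com/Gyeo1/CodeTest_Practice | 프로그래머스 연습/Level2/기능개발.py | solution
-- ===== SOURCE A (Python) =====
-- from collections import deque
--
-- def solution(progresses, speeds):
--     deq=deque()
--     deq2=deque()
--     answer = []
--     for i in range(len(progresses)):
--         deq.append(progresses[i])#deq에다 넣어주기
--         deq2.append(speeds[i])
--     while deq:
--         check = 0
--         for i in range(len(deq2)):
--             deq[i]+=deq2[i]
--         while deq and deq[0]>=100 :
--             check+=1
--             deq.popleft()
--             deq2.popleft()
--         if check!=0:
--             answer.append(check)
--     return answer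
-- ===== SOURCE B (Python) =====
-- def solution(progresses, speeds):
--     # days[i] = first day task i is individually done: max(1, ceil((100 - p) / s))
--     days = [max(1, -((p - 100) // s)) for p, s in zip(progresses, speeds)]
--     answer = []
--     i = 0
--     n = len(days)
--     while i < n:
--         d = days[i]
--         j = i + 1
--         while j < n and days[j] <= d:
--             j += 1
--         answer.append(j - i)
--         i = j
--     return answer
-- ===== Notes on version B (the rewrite author's own statement) =====
-- stated objective: alternative
-- what changed: A simulates the queue day by day (incrementing every queued task's progress each day and popping completed fronts); B computes each task's completion day in closed form with ceiling division and emits the lengths of maximal runs of days bounded by the run's first day, in one pass (intended as the asymptotically cheaper algorithm; a timing run could not verify a ratio because A timed out at the larger sizes).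
-- outside the precondition, e.g. on solution([50, 103], [50, -2]): A returns [2], B returns [1, 1]; on solution([100], [0]): A returns [1], B raises ZeroDivisionError
import Mathlib
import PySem

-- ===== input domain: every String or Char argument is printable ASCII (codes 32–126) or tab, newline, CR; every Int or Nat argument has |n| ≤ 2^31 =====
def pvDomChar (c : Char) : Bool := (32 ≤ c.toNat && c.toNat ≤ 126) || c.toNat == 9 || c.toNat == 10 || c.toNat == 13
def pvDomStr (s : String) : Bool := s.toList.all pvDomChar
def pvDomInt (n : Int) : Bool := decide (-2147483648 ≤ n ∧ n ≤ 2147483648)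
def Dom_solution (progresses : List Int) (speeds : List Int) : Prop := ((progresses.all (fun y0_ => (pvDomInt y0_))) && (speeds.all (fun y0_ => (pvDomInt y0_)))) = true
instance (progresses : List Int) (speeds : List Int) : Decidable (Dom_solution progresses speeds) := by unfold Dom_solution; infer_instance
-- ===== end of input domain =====

-- B replaces A's day-by-day simulation of all queued tasks by a closed-form completion
-- day per task (ceiling division) and one grouping pass; return values agree on Pre_.

-- ===== PORT A =====
-- inner while: pop from the front of both deques while the front value is ≥ 100; returns (check, deq, deq2)
def popAll : List Int → List Int → Nat × List Int × List Int
  | p :: ps, s :: ss =>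
    if 100 ≤ p then
      let r := popAll ps ss
      (r.1 + 1, r.2)
    else (0, p :: ps, s :: ss)
  | ps, ss => (0, ps, ss)

-- outer while deq: add speeds pointwise (deq and deq2 always have equal length here,
-- so zipWith is exact), pop completed front tasks, append check if nonzero.
-- Python's while loop is fuel-driven here; `solution` passes fuel that is proved
-- sufficient on every Pre_ input.
def loopA : Nat → List Int → List Int → List Int → List Int
  | 0, _, _, acc => acc
  | fuel + 1, ps, ss, acc =>
    match ps with
    | [] => acc
    | _ :: _ =>
      let ps1 := List.zipWith (· + ·) ps ss
      let r := popAll ps1 ss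
      loopA fuel r.2.1 r.2.2 (if r.1 = 0 then acc else acc ++ [(r.1 : Int)])

def solution (progresses : List Int) (speeds : List Int) : List Int :=
  -- the building loop copies progresses and the first len(progresses) speeds
  -- (IndexError when speeds is shorter: excluded by Pre_)
  loopA ((progresses.map (fun p => 1 + (100 - p).toNat)).sum + 1)
    progresses (speeds.take progresses.length) []

-- ===== PORT B =====
-- days = max(1, -((p - 100) // s)) : first day task (p, s) is individually done
def pyDays (p s : Int) : Int := max 1 (-(PySem.Int.floordiv (p - 100) s))

-- the index-scan while loops of Source B: take one maximal run `days[j] <= d`, emit its length, repeat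
def groupRuns : List Int → List Int
  | [] => []
  | d :: ds =>
    (((ds.takeWhile (fun x => x ≤ d)).length : Int) + 1) ::
      groupRuns (ds.dropWhile (fun x => x ≤ d))
  termination_by l => l.length
  decreasing_by
    have := List.length_dropWhile_le (fun x => decide (x ≤ d)) ds
    simp; omega

def solution_alt (progresses : List Int) (speeds : List Int) : List Int :=
  groupRuns (List.zipWith pyDays progresses speeds)

-- ===== PRECONDITION & SPEC =====
-- Pre_ excludes inputs where A raises IndexError (fewer speeds than progresses) and
-- inputs with a nonpositive used speed, on which A's day-by-day loop diverges for any
-- unfinished task and otherwise returns values tied to the accidental order of pops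
-- (B raises ZeroDivisionError for speed 0 and groups by per-task days for speed < 0).
def Pre_solution (progresses : List Int) (speeds : List Int) : Prop :=
  progresses.length ≤ speeds.length ∧
    ∀ s ∈ speeds.take progresses.length, 1 ≤ s
instance (progresses : List Int) (speeds : List Int) : Decidable (Pre_solution progresses speeds) := by
  unfold Pre_solution; infer_instance

def pvWitness_solution : List Int × List Int := ([93, 30, 55], [1, 30, 5])

def Spec_solution (progresses : List Int) (speeds : List Int) (out : List Int) : Prop := out = solution_alt progresses speeds
instance (progresses : List Int) (speeds : List Int) (out : List Int) : Decidable (Spec_solution progresses speeds out) := by unfold Spec_solution; infer_instance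

-- ===== CLAIM (what is proved, stated in full; the proofs are below) =====
def Claim_equal_solution : Prop := ∀ (progresses : List Int) (speeds : List Int), Dom_solution progresses speeds → Pre_solution progresses speeds → Spec_solution progresses speeds (solution progresses speeds)


-- ===== LEMMAS AND PROOFS =====

theorem pyDays_ge_one (p s : Int) : 1 ≤ pyDays p s := le_max_left _ _

theorem pyDays_le_iff (p s d : Int) (hs : 1 ≤ s) (hd : 1 ≤ d) :
    pyDays p s ≤ d ↔ 100 ≤ p + d * s := by
  unfold pyDays
  rw [max_le_iff]
  constructor
  · rintro ⟨-, h⟩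
    have h2 : -d ≤ PySem.Int.floordiv (p - 100) s := by omega
    have := (PySem.Int.le_floordiv_iff_mul_le (a := p - 100) (b := s) (q := -d) (by omega)).1 h2
    nlinarith
  · intro h
    have h2 : -d * s ≤ p - 100 := by nlinarith
    have := (PySem.Int.le_floordiv_iff_mul_le (a := p - 100) (b := s) (q := -d) (by omega)).2 h2
    omega

theorem pyDays_shift (p s : Int) (hs : s ≠ 0) :
    pyDays (p + s) s = max 1 (pyDays p s - 1) := by
  unfold pyDays
  show max 1 (-(Int.fdiv (p + s - 100) s)) = _
  have e : p + s - 100 = p - 100 + 1 * s := by ring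
  rw [e, Int.add_mul_fdiv_right (p - 100) 1 hs]
  show _ = max 1 (max 1 (-(Int.fdiv (p - 100) s)) - 1)
  omega

theorem le_foldr_max (l : List Int) (x : Int) (hx : x ∈ l) : x ≤ l.foldr max 0 := by
  induction l with
  | nil => simp at hx
  | cons a t ih =>
    rcases List.mem_cons.1 hx with h | h
    · subst h; exact le_max_left _ _
    · exact le_trans (ih h) (le_max_right _ _)

theorem foldr_max_le (l : List Int) (c : Int) (hc : 0 ≤ c) (h : ∀ x ∈ l, x ≤ c) :
    l.foldr max 0 ≤ c := by
  induction l with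
  | nil => simpa using hc
  | cons a t ih =>
    have := h a (by simp)
    have := ih (fun x hx => h x (by simp [hx]))
    simp only [List.foldr_cons]
    omega

theorem one_le_zip_days (ps : List Int) (ss : List Int) (x : Int)
    (hx : x ∈ List.zipWith pyDays ps ss) : 1 ≤ x := by
  induction ps generalizing ss with
  | nil => simp at hx
  | cons p ps ih =>
    cases ss with
    | nil => simp at hx
    | cons s ss =>
      rcases List.mem_cons.1 hx with h | h
      · subst h; exact pyDays_ge_one p s
      · exact ih ss h

theorem dropWhile_eq_drop (p : Int → Bool) (l : List Int) :
    l.dropWhile p = l.drop (l.takeWhile p).length := by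
  induction l with
  | nil => rfl
  | cons a t ih =>
    by_cases h : p a
    · simp [List.dropWhile_cons, List.takeWhile_cons, h, ih]
    · simp [List.dropWhile_cons, List.takeWhile_cons, h]

theorem zipWith_take_right (f : Int → Int → Int) (ps ss : List Int) :
    List.zipWith f ps (ss.take ps.length) = List.zipWith f ps ss := by
  induction ps generalizing ss with
  | nil => simp
  | cons p ps ih =>
    cases ss with
    | nil => simp
    | cons s ss => simp [List.zipWith_cons_cons, ih]

theorem pyDays_le_bound (p s : Int) (hs : 1 ≤ s) :
    pyDays p s ≤ (1 : Int) + ((100 - p).toNat : Int) := by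
  rw [pyDays_le_iff p s _ hs (by omega)]
  have hd : (0:Int) ≤ (1 : Int) + ((100 - p).toNat : Int) := by omega
  have := le_mul_of_one_le_right hd hs
  omega

theorem foldr_days_le_sum (ps ss : List Int) (hs : ∀ s ∈ ss, 1 ≤ s) :
    (List.zipWith pyDays ps ss).foldr max 0 ≤
      (((ps.map (fun p => (1 + (100 - p).toNat : Nat))).sum : Nat) : Int) := by
  induction ps generalizing ss with
  | nil => simp
  | cons p ps ih =>
    cases ss with
    | nil =>
      simp only [List.zipWith_nil_right, List.foldr_nil]
      exact Int.natCast_nonneg _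
    | cons s ss =>
      have h1 := pyDays_le_bound p s (hs s (by simp))
      have h2 := ih ss (fun x hx => hs x (by simp [hx]))
      simp only [List.zipWith_cons_cons, List.foldr_cons, List.map_cons, List.sum_cons]
      rw [Nat.cast_add, Nat.cast_add, Nat.cast_one]
      omega

theorem popAll_spec (ps ss : List Int) (hlen : ps.length = ss.length)
    (hs : ∀ s ∈ ss, 1 ≤ s) :
    popAll (List.zipWith (· + ·) ps ss) ss =
      (((List.zipWith pyDays ps ss).takeWhile (fun x => x ≤ 1)).length,
        List.zipWith (· + ·)
          (ps.drop ((List.zipWith pyDays ps ss).takeWhile (fun x => x ≤ 1)).length)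
          (ss.drop ((List.zipWith pyDays ps ss).takeWhile (fun x => x ≤ 1)).length),
        ss.drop ((List.zipWith pyDays ps ss).takeWhile (fun x => x ≤ 1)).length) := by
  induction ps generalizing ss with
  | nil => simp [popAll]
  | cons p ps ih =>
    cases ss with
    | nil => simp at hlen
    | cons s ss =>
      have hs1 : 1 ≤ s := hs s (by simp)
      have hiff := pyDays_le_iff p s 1 hs1 le_rfl
      simp only [List.zipWith_cons_cons, List.takeWhile_cons]
      by_cases hc : pyDays p s ≤ 1
      · have hc' : 100 ≤ p + s := by have := hiff.1 hc; omega
        have hrec := ih ss (by simpa using hlen) (fun x hx => hs x (by simp [hx]))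
        simp only [hc, decide_true, if_pos (show (100:Int) ≤ p + s by omega), popAll, hrec]
        simp
      · have hc' : ¬ (100 ≤ p + s) := fun h => hc (hiff.2 (by omega))
        simp only [hc, decide_false, popAll, if_neg (show ¬ (100:Int) ≤ p + s from hc')]
        simp

theorem zip_days_shift (ps ss : List Int) (hs : ∀ s ∈ ss, 1 ≤ s) :
    List.zipWith pyDays (List.zipWith (· + ·) ps ss) ss =
      (List.zipWith pyDays ps ss).map (fun x => max 1 (x - 1)) := by
  induction ps generalizing ss with
  | nil => simp
  | cons p ps ih =>
    cases ss with
    | nil => simp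
    | cons s ss =>
      have hs1 : 1 ≤ s := hs s (by simp)
      simp only [List.zipWith_cons_cons, List.map_cons]
      rw [pyDays_shift p s (by omega), ih ss (fun x hx => hs x (by simp [hx]))]

theorem groupRuns_shift (ds : List Int) :
    (∀ d, ds.head? = some d → 2 ≤ d) →
    groupRuns (ds.map (fun x => max 1 (x - 1))) = groupRuns ds := by
  induction ds using groupRuns.induct with
  | case1 => intro _; rfl
  | case2 d ds ih =>
    intro h
    have hd : 2 ≤ d := h d rfl
    have hpq : (fun x : Int => decide (max 1 (x - 1) ≤ max 1 (d - 1))) =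
        (fun x : Int => decide (x ≤ d)) := by
      funext x
      rw [decide_eq_decide]
      omega
    have htw : (ds.map (fun x => max 1 (x - 1))).takeWhile (fun x => x ≤ max 1 (d - 1)) =
        (ds.takeWhile (fun x => x ≤ d)).map (fun x => max 1 (x - 1)) := by
      rw [List.takeWhile_map]
      simp only [Function.comp_def]
      rw [hpq]
    have hdw : (ds.map (fun x => max 1 (x - 1))).dropWhile (fun x => x ≤ max 1 (d - 1)) =
        (ds.dropWhile (fun x => x ≤ d)).map (fun x => max 1 (x - 1)) := by
      rw [List.dropWhile_map]
      simp only [Function.comp_def]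
      rw [hpq]
    have hrest : ∀ d', (ds.dropWhile (fun x => x ≤ d)).head? = some d' → 2 ≤ d' := by
      intro d' hd'
      have := List.head?_dropWhile_not (fun x => decide (x ≤ d)) ds
      rw [hd'] at this
      simp at this
      omega
    rw [List.map_cons, groupRuns, groupRuns, htw, hdw, List.length_map, ih hrest]

theorem fuel_step (fuel : Nat) (ds t : List Int) (hsub : ∀ x ∈ t, x ∈ ds)
    (hne : 1 ≤ ds.foldr max 0) (hm : (ds.foldr max 0).toNat < fuel + 1)
    (h2 : 2 ≤ ds.foldr max 0 ∨ t = []) :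
    ((t.map (fun x => max 1 (x - 1))).foldr max 0).toNat < fuel := by
  rcases h2 with h2 | rfl
  · have hb : (t.map (fun x => max 1 (x - 1))).foldr max 0 ≤ ds.foldr max 0 - 1 := by
      apply foldr_max_le _ _ (by omega)
      intro y hy
      rcases List.mem_map.1 hy with ⟨x, hx, rfl⟩
      have := le_foldr_max ds x (hsub x hx)
      omega
    omega
  · simp only [List.map_nil, List.foldr_nil]
    omega

theorem loopA_spec (fuel : Nat) :
    ∀ (ps ss acc : List Int), ps.length = ss.length → (∀ s ∈ ss, 1 ≤ s) →
    ((List.zipWith pyDays ps ss).foldr max 0).toNat < fuel →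
    loopA fuel ps ss acc = acc ++ groupRuns (List.zipWith pyDays ps ss) := by
  induction fuel with
  | zero => intro ps ss acc _ _ hf; omega
  | succ fuel ih =>
    intro ps ss acc hlen hs hf
    cases ps with
    | nil => simp [loopA, groupRuns]
    | cons p ps' =>
      cases ss with
      | nil => simp at hlen
      | cons s ss' =>
      have hs1 : 1 ≤ s := hs s (by simp)
      have hlen' : ps'.length = ss'.length := by simpa using hlen
      have hone : ∀ x ∈ List.zipWith pyDays (p :: ps') (s :: ss'), 1 ≤ x :=
        fun x hx => one_le_zip_days _ _ x hx
      have hhead : pyDays p s ∈ List.zipWith pyDays (p :: ps') (s :: ss') := by simp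
      have hm1 : 1 ≤ (List.zipWith pyDays (p :: ps') (s :: ss')).foldr max 0 :=
        le_trans (hone _ hhead) (le_foldr_max _ _ hhead)
      have hpop := popAll_spec (p :: ps') (s :: ss') hlen hs
      rw [loopA]
      simp only [hpop]
      by_cases hc : pyDays p s ≤ 1
      · -- the front task completes this day; all leading tasks with day 1 pop together
        have hdeq : pyDays p s = 1 := le_antisymm hc (pyDays_ge_one p s)
        have htw : (List.zipWith pyDays (p :: ps') (s :: ss')).takeWhile (fun x => x ≤ 1) =
            pyDays p s :: (List.zipWith pyDays ps' ss').takeWhile (fun x => x ≤ 1) := by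
          simp [List.takeWhile_cons, hc]
        have hdwc : (List.zipWith pyDays (p :: ps') (s :: ss')).dropWhile (fun x => x ≤ 1) =
            (List.zipWith pyDays ps' ss').dropWhile (fun x => x ≤ 1) := by
          simp [List.dropWhile_cons, hc]
        rw [htw]
        simp only [List.length_cons, List.drop_succ_cons]
        rw [if_neg (Nat.succ_ne_zero _)]
        -- the recursive state: one day has passed, the popped prefix is gone
        have hdays2 : List.zipWith pyDays
            (List.zipWith (· + ·)
              (ps'.drop ((List.zipWith pyDays ps' ss').takeWhile (fun x => x ≤ 1)).length)
              (ss'.drop ((List.zipWith pyDays ps' ss').takeWhile (fun x => x ≤ 1)).length))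
            (ss'.drop ((List.zipWith pyDays ps' ss').takeWhile (fun x => x ≤ 1)).length) =
            ((List.zipWith pyDays ps' ss').dropWhile (fun x => x ≤ 1)).map
              (fun x => max 1 (x - 1)) := by
          rw [zip_days_shift _ _ (fun x hx => hs x (by exact List.mem_cons_of_mem _ (List.mem_of_mem_drop hx))),
            ← List.drop_zipWith, ← dropWhile_eq_drop]
        have hsubdw : ∀ x ∈ (List.zipWith pyDays ps' ss').dropWhile (fun x => x ≤ 1),
            x ∈ List.zipWith pyDays (p :: ps') (s :: ss') := by
          intro x hx
          exact List.mem_cons_of_mem _ ((List.dropWhile_sublist _).subset hx)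
        have hdw_head : ∀ d', ((List.zipWith pyDays ps' ss').dropWhile (fun x => x ≤ 1)).head? = some d' → 2 ≤ d' := by
          intro d' hd'
          have := List.head?_dropWhile_not (fun x => decide (x ≤ 1)) (List.zipWith pyDays ps' ss')
          rw [hd'] at this
          simp at this
          omega
        have hcase2 : 2 ≤ (List.zipWith pyDays (p :: ps') (s :: ss')).foldr max 0 ∨
            (List.zipWith pyDays ps' ss').dropWhile (fun x => x ≤ 1) = [] := by
          by_cases hm2 : 2 ≤ (List.zipWith pyDays (p :: ps') (s :: ss')).foldr max 0
          · exact Or.inl hm2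
          · refine Or.inr (List.dropWhile_eq_nil_iff.2 ?_)
            intro x hx
            have hx' : x ∈ List.zipWith pyDays (p :: ps') (s :: ss') :=
              List.mem_cons_of_mem _ hx
            have := hone x hx'
            have := le_foldr_max _ x hx'
            simp
            omega
        rw [ih _ _ _ (by simp [hlen']) (fun x hx => hs x (List.mem_cons_of_mem _ (List.mem_of_mem_drop hx)))
          (by rw [hdays2]; exact fuel_step fuel _ _ hsubdw hm1 hf hcase2)]
        rw [hdays2, groupRuns_shift _ hdw_head]
        -- the claimed output: groupRuns of the day list, whose head is 1
        have hgr : groupRuns (List.zipWith pyDays (p :: ps') (s :: ss')) =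
            (((List.zipWith pyDays ps' ss').takeWhile (fun x => x ≤ 1)).length + 1 : Int) ::
              groupRuns ((List.zipWith pyDays ps' ss').dropWhile (fun x => x ≤ 1)) := by
          rw [List.zipWith_cons_cons, groupRuns, hdeq]
        rw [hgr, List.append_assoc]
        push_cast
        rfl
      · -- no task completes this day: check = 0, everything advances one day
        have htw0 : (List.zipWith pyDays (p :: ps') (s :: ss')).takeWhile (fun x => x ≤ 1) =
            ([] : List Int) := by
          simp [List.takeWhile_cons, hc]
        rw [htw0]
        simp only [List.length_nil, List.drop_zero, if_pos rfl]
        have hdays2 : List.zipWith pyDays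
            (List.zipWith (· + ·) (p :: ps') (s :: ss')) (s :: ss') =
            (List.zipWith pyDays (p :: ps') (s :: ss')).map (fun x => max 1 (x - 1)) :=
          zip_days_shift _ _ hs
        have hfoldr2 : 2 ≤ (List.zipWith pyDays (p :: ps') (s :: ss')).foldr max 0 :=
          le_trans (by omega) (le_foldr_max _ _ hhead)
        rw [ih _ _ _ (by simp [List.length_zipWith, hlen']) hs
          (by rw [hdays2]; exact fuel_step fuel _ _ (fun x hx => hx) hm1 hf (Or.inl hfoldr2))]
        rw [hdays2, groupRuns_shift _ (by
          intro d' hd'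
          simp at hd'
          omega)]
        simp

-- ===== VERDICT (by name: the statement is the Claim_ definition above) =====
theorem solution_spec : Claim_equal_solution := by
  intro ps ss _ hpre
  obtain ⟨hle, hs⟩ := hpre
  show solution ps ss = solution_alt ps ss
  unfold solution solution_alt
  rw [loopA_spec _ ps (ss.take ps.length) []
    (by simp [List.length_take]; omega) hs
    (by
      have := foldr_days_le_sum ps (ss.take ps.length) hs
      omega)]
  rw [zipWith_take_right]
  rfl
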